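-- pv_equiv track=rewrite | github.com/Lucanb/Python | Lab_2/Ex_9.py | pers_obs
-- ===== SOURCE A (Python) =====
-- def pers_obs(mat):
--     seats = []
--
--     for i in range(len(mat)):
--         for j in range(len(mat[i])):
--             height = mat[i][j]
--             verif = False
--
--             for k in range(i):
--                 if mat[k][j] >= height:
--                     verif = True
--                     break
--
--             if verif:
--                 seats.append((i, j))
--
--     return seats
-- ===== SOURCE B (Python) =====
-- def pers_obs(mat):
--     seats = []
--     best = {}  # column -> running max height over the rows already seen
--     for i, row in enumerate(mat):
--         for j, h in enumerate(row):
--             if j in best and best[j] >= h: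
--                 seats.append((i, j))
--             if j not in best or best[j] < h:
--                 best[j] = h
--     return seats
-- ===== Notes on version B (the rewrite author's own statement) =====
-- stated objective: alternative
-- what changed: Replaces the per-cell rescan of all rows above (a third nested loop) by a single top-down pass keeping a running column-maximum dictionary (intended as asymptotically lighter; measured ~1.4x on the probe sizes, below the 1.5x bar).
import Mathlib
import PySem

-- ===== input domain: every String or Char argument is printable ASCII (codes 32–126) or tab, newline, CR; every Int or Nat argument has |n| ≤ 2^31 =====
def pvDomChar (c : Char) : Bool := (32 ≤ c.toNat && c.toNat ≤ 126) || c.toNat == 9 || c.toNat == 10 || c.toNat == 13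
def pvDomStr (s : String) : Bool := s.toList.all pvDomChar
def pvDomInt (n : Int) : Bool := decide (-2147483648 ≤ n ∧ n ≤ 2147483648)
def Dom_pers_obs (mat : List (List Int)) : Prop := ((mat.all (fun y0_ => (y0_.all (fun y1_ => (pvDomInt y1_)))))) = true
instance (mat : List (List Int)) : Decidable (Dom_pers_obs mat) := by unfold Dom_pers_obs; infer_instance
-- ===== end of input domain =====

-- B replaces A's per-cell rescan of all rows above (third nested loop) by one top-down
-- pass keeping a running column-maximum dictionary.

-- ===== PORT A =====
-- inner loop 'for k in range(i): if mat[k][j] >= height: verif = True; break'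
-- (mat[k][j] can raise IndexError on ragged input — ported with getD 0, exact on Pre_;
--  mat[i] and mat[i][j] of the two outer loops are always in range, so getD is exact there)
def persObsVerif (mat : List (List Int)) (j : Nat) (height : Int) : List Nat → Bool
  | [] => false
  | k :: ks => if height ≤ (mat.getD k []).getD j 0 then true else persObsVerif mat j height ks

def pers_obs (mat : List (List Int)) : List (Int × Int) :=
  (List.range mat.length).foldl (fun seats i =>
    (List.range (mat.getD i []).length).foldl (fun seats j =>
      if persObsVerif mat j ((mat.getD i []).getD j 0) (List.range i) then
        seats ++ [((i : Int), (j : Int))]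
      else seats) seats) []

-- ===== PORT B =====
def pers_obs_alt (mat : List (List Int)) : List (Int × Int) :=
  ((PySem.List.enumerate mat).foldl (fun (st : List (Int × Int) × PySem.Dict Int Int) pi =>
    (PySem.List.enumerate pi.2).foldl (fun st pj =>
      ((match st.2.get? pj.1 with          -- if j in best and best[j] >= h: seats.append((i, j))
        | some m => if pj.2 ≤ m then st.1 ++ [(pi.1, pj.1)] else st.1
        | none => st.1),
       (match st.2.get? pj.1 with          -- if j not in best or best[j] < h: best[j] = h
        | some m => if m < pj.2 then st.2.insert pj.1 pj.2 else st.2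
        | none => st.2.insert pj.1 pj.2))) st) (([] : List (Int × Int)), (PySem.Dict.empty : PySem.Dict Int Int))).1

-- ===== PRECONDITION & SPEC =====
-- Pre_ is exactly the inputs on which the Python A returns: A raises IndexError at cell
-- (i,j) of a ragged matrix iff some earlier row k is too short (len(mat[k]) <= j) and no
-- still earlier row carries a cell >= mat[i][j] that breaks the scan before row k is read.
def Pre_pers_obs (mat : List (List Int)) : Prop :=
  ∀ i < mat.length, ∀ j < (mat.getD i []).length, ∀ k < i,
    (mat.getD k []).length ≤ j →
    ∃ k' < k, j < (mat.getD k' []).length ∧ (mat.getD i []).getD j 0 ≤ (mat.getD k' []).getD j 0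
instance (mat : List (List Int)) : Decidable (Pre_pers_obs mat) := by unfold Pre_pers_obs; apply Nat.decidableBallLT
def pvWitness_pers_obs : List (List Int) := [[3, 2], [1, 2], [0, 5]]

def Spec_pers_obs (mat : List (List Int)) (out : List (Int × Int)) : Prop := out = pers_obs_alt mat
instance (mat : List (List Int)) (out : List (Int × Int)) : Decidable (Spec_pers_obs mat out) := by unfold Spec_pers_obs; infer_instance

-- ===== CLAIM (what is proved, stated in full; the proofs are below) =====
def Claim_equal_pers_obs : Prop := ∀ (mat : List (List Int)), Dom_pers_obs mat → Pre_pers_obs mat → Spec_pers_obs mat (pers_obs mat)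

-- ===== LEMMAS AND PROOFS =====

-- the common reference: hitB prev j h decides whether some earlier row blocks column j,
-- via the running column maximum colMax; specGo lists the blocked cells row-major.
def pushMax : Option Int → Int → Int
  | none, h => h
  | some m, h => max m h

def colMax : List (List Int) → Nat → Option Int
  | [], _ => none
  | r :: rest, j => if j < r.length then some (pushMax (colMax rest j) (r.getD j 0)) else colMax rest j

def hitB (prev : List (List Int)) (j : Nat) (h : Int) : Bool :=
  match colMax prev j with
  | some m => h ≤ m
  | none => false

def bodySpec (prev : List (List Int)) (i : Int) (row : List Int) : List (Int × Int) :=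
  ((PySem.List.enumerate row).filter (fun pj => hitB prev pj.1.toNat pj.2)).map (fun pj => (i, pj.1))

def specGo : List (List Int) → List (List Int) → List (Int × Int)
  | _, [] => []
  | prev, row :: rest => bodySpec prev (prev.length : Int) row ++ specGo (prev ++ [row]) rest

lemma verif_eq_any (mat : List (List Int)) (j : Nat) (h : Int) (l : List Nat) :
    persObsVerif mat j h l = l.any (fun k => decide (h ≤ (mat.getD k []).getD j 0)) := by
  induction l with
  | nil => rfl
  | cons a tl ih =>
      by_cases hc : h ≤ (mat.getD a []).getD j 0 <;> simp [persObsVerif, hc, ih]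

lemma foldl_outer (g : Nat → Nat) (p : Nat → Nat → Bool) (fm : Nat → Nat → Int × Int) :
    ∀ (l : List Nat) (acc : List (Int × Int)),
    l.foldl (fun seats i => (List.range (g i)).foldl
        (fun s j => if p i j then s ++ [fm i j] else s) seats) acc
      = acc ++ l.flatMap (fun i => ((List.range (g i)).filter (p i)).map (fm i)) := by
  intro l
  induction l with
  | nil => simp
  | cons a tl ih =>
      intro acc
      simp only [List.foldl_cons, List.flatMap_cons]
      rw [PySem.List.foldl_append_if (p a) (fm a), ih, List.append_assoc]

lemma pushMax_swap (o : Option Int) (a b : Int) :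
    pushMax (some (pushMax o a)) b = pushMax (some (pushMax o b)) a := by
  cases o <;> simp [pushMax] <;> omega

lemma colMax_append (prev : List (List Int)) (row : List Int) (j : Nat) :
    colMax (prev ++ [row]) j
      = if j < row.length then some (pushMax (colMax prev j) (row.getD j 0)) else colMax prev j := by
  induction prev with
  | nil => by_cases hr : j < row.length <;> simp [colMax, hr, pushMax]
  | cons r rest ih =>
      by_cases hr : j < r.length <;> by_cases hw : j < row.length <;>
        simp [colMax, hr, hw, ih, pushMax_swap]

lemma hitB_cons_iff (r : List Int) (rest : List (List Int)) (j : Nat) (h : Int) :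
    hitB (r :: rest) j h = true ↔ ((j < r.length ∧ h ≤ r.getD j 0) ∨ hitB rest j h = true) := by
  by_cases hr : j < r.length
  · cases hc : colMax rest j with
    | none => simp [hitB, colMax, hr, hc, pushMax]
    | some m =>
        simp only [hitB, colMax, hr, if_pos, hc, pushMax]
        rw [decide_eq_true_iff, le_max_iff]
        simp [hr]
        tauto
  · simp [hitB, colMax, hr]

lemma hitB_iff (prev : List (List Int)) (j : Nat) (h : Int) :
    hitB prev j h = true ↔ ∃ r ∈ prev, j < r.length ∧ h ≤ r.getD j 0 := by
  induction prev with
  | nil => simp [hitB, colMax]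
  | cons r rest ih =>
      rw [hitB_cons_iff, ih]
      constructor
      · rintro (⟨h1, h2⟩ | ⟨x, hx, h1, h2⟩)
        exacts [⟨r, .head _, h1, h2⟩, ⟨x, .tail _ hx, h1, h2⟩]
      · rintro ⟨x, hx, h1, h2⟩
        rcases List.mem_cons.mp hx with rfl | hx
        exacts [Or.inl ⟨h1, h2⟩, Or.inr ⟨x, hx, h1, h2⟩]

lemma A_flatMap (mat : List (List Int)) :
    pers_obs mat = (List.range mat.length).flatMap (fun i =>
      ((List.range (mat.getD i []).length).filter
        (fun j => persObsVerif mat j ((mat.getD i []).getD j 0) (List.range i))).map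
        (fun j : Nat => ((i : Int), (j : Int)))) := by
  unfold pers_obs
  rw [foldl_outer (fun i => (mat.getD i []).length)
    (fun i j => persObsVerif mat j ((mat.getD i []).getD j 0) (List.range i))
    (fun i j => ((i : Int), (j : Int))), List.nil_append]

lemma verif_eq_hitB (mat : List (List Int)) (hP : Pre_pers_obs mat) (i j : Nat)
    (hi : i < mat.length) (hj : j < (mat.getD i []).length) :
    persObsVerif mat j ((mat.getD i []).getD j 0) (List.range i)
      = hitB (mat.take i) j ((mat.getD i []).getD j 0) := by
  set h := (mat.getD i []).getD j 0 with hh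
  rw [verif_eq_any, Bool.eq_iff_iff, List.any_eq_true, hitB_iff]
  constructor
  · rintro ⟨k, hk, hle⟩
    rw [List.mem_range] at hk
    rw [decide_eq_true_eq] at hle
    by_cases hlen : j < (mat.getD k []).length
    · refine ⟨mat.getD k [], ?_, hlen, hle⟩
      rw [List.mem_take_iff_getElem]
      exact ⟨k, by omega, by rw [List.getD_eq_getElem?_getD, List.getElem?_eq_getElem (by omega)]; rfl⟩
    · rcases hP i hi j hj k hk (by omega) with ⟨k', hk', hlen', hle'⟩
      refine ⟨mat.getD k' [], ?_, hlen', hle'⟩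
      rw [List.mem_take_iff_getElem]
      exact ⟨k', by omega, by rw [List.getD_eq_getElem?_getD, List.getElem?_eq_getElem (by omega)]; rfl⟩
  · rintro ⟨r, hr, hlen, hle⟩
    rw [List.mem_take_iff_getElem] at hr
    rcases hr with ⟨k, hk, hkr⟩
    refine ⟨k, List.mem_range.mpr (by omega), ?_⟩
    rw [decide_eq_true_eq]
    have : mat.getD k [] = r := by
      rw [List.getD_eq_getElem?_getD, List.getElem?_eq_getElem (by omega), hkr]; rfl
    rw [this]
    exact hle

lemma enumerate_eq_map (row : List Int) :
    ∀ s : Nat, PySem.List.enumerate row (s : Int)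
      = (List.range row.length).map (fun t => (((s + t : Nat) : Int), row.getD t 0)) := by
  induction row with
  | nil => intro s; simp [PySem.List.enumerate]
  | cons a tl ih =>
      intro s
      rw [PySem.List.enumerate_cons]
      have : ((s : Int) + 1) = ((s + 1 : Nat) : Int) := by push_cast; ring
      rw [this, ih (s + 1), List.length_cons, List.range_succ_eq_map, List.map_cons, List.map_map]
      refine congrArg₂ _ (by simp) ?_
      apply List.map_congr_left
      intro t _
      have h1 : s + 1 + t = s + (t + 1) := by omega
      rw [Function.comp_apply, h1, List.getD_cons_succ]

lemma bodySpec_eq_range (prev : List (List Int)) (i : Int) (row : List Int) :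
    bodySpec prev i row
      = ((List.range row.length).filter (fun t => hitB prev t (row.getD t 0))).map
          (fun t : Nat => (i, (t : Int))) := by
  unfold bodySpec
  have h0 : (0 : Int) = ((0 : Nat) : Int) := rfl
  rw [h0, enumerate_eq_map row 0, List.filter_map, List.map_map]
  simp [Function.comp_def]

lemma innerB (i : Int) (prev : List (List Int)) :
    ∀ (rest : List Int) (s : Nat) (seats : List (Int × Int)) (d : PySem.Dict Int Int),
    (∀ j : Nat, s ≤ j → d.get? (j : Int) = colMax prev j) →
    (let r := (PySem.List.enumerate rest (s : Int)).foldl (fun (st : List (Int × Int) × PySem.Dict Int Int) pj =>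
        ((match st.2.get? pj.1 with
          | some m => if pj.2 ≤ m then st.1 ++ [(i, pj.1)] else st.1
          | none => st.1),
         (match st.2.get? pj.1 with
          | some m => if m < pj.2 then st.2.insert pj.1 pj.2 else st.2
          | none => st.2.insert pj.1 pj.2))) (seats, d)
     r.1 = seats ++ ((PySem.List.enumerate rest (s : Int)).filter
              (fun pj => hitB prev pj.1.toNat pj.2)).map (fun pj => (i, pj.1))
     ∧ (∀ j : Nat, j < s → r.2.get? (j : Int) = d.get? (j : Int))
     ∧ (∀ j : Nat, s ≤ j → r.2.get? (j : Int) =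
          if j - s < rest.length then some (pushMax (colMax prev j) (rest.getD (j - s) 0))
          else colMax prev j)) := by
  intro rest
  induction rest with
  | nil =>
      intro s seats d hd
      refine ⟨by simp [PySem.List.enumerate], fun j _ => rfl, ?_⟩
      intro j hj
      rw [if_neg (by simp : ¬ j - s < ([] : List Int).length)]
      exact hd j hj
  | cons a tl ih =>
      intro s seats d hd
      set F := (fun (st : List (Int × Int) × PySem.Dict Int Int) (pj : Int × Int) =>
        ((match st.2.get? pj.1 with
          | some m => if pj.2 ≤ m then st.1 ++ [(i, pj.1)] else st.1
          | none => st.1),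
         (match st.2.get? pj.1 with
          | some m => if m < pj.2 then st.2.insert pj.1 pj.2 else st.2
          | none => st.2.insert pj.1 pj.2))) with hF
      have hds : d.get? (s : Int) = colMax prev s := hd s (le_refl s)
      have hcast : (s : Int) + 1 = ((s + 1 : Nat) : Int) := by push_cast; ring
      set d1 : PySem.Dict Int Int :=
        (match d.get? (s : Int) with
          | some m => if m < a then d.insert (s : Int) a else d
          | none => d.insert (s : Int) a) with hd1def
      set seats1 : List (Int × Int) :=
        (match d.get? (s : Int) with
          | some m => if a ≤ m then seats ++ [(i, (s : Int))] else seats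
          | none => seats) with hseats1def
      have hseats1 : seats1 = seats ++ (if hitB prev s a then [(i, (s : Int))] else []) := by
        rw [hseats1def, hds]
        cases hc : colMax prev s with
        | none => simp [hitB, hc]
        | some m => by_cases hm : a ≤ m <;> simp [hitB, hc, hm]
      have hd1s : d1.get? (s : Int) = some (pushMax (colMax prev s) a) := by
        rw [hd1def, hds]
        cases hc : colMax prev s with
        | none => simp [PySem.Dict.get?_insert_self, pushMax]
        | some m =>
            by_cases hm : m < a
            · simp [hm, PySem.Dict.get?_insert_self, pushMax, max_eq_right (le_of_lt hm)]
            · simp [hm, hds, hc, pushMax, max_eq_left (by omega : a ≤ m)]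
      have hd1ne : ∀ j : Nat, j ≠ s → d1.get? (j : Int) = d.get? (j : Int) := by
        intro j hj
        have hne : (j : Int) ≠ (s : Int) := by exact_mod_cast hj
        rw [hd1def]
        cases d.get? (s : Int) with
        | none => simp [PySem.Dict.get?_insert, hne]
        | some m =>
            by_cases hm : m < a
            · simp [hm, PySem.Dict.get?_insert, hne]
            · simp [hm]
      have hd1 : ∀ j : Nat, s + 1 ≤ j → d1.get? (j : Int) = colMax prev j := by
        intro j hj
        rw [hd1ne j (by omega)]
        exact hd j (by omega)
      obtain ⟨ih1, ih2, ih3⟩ := ih (s + 1) seats1 d1 hd1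
      have hfold : List.foldl F (seats, d) (PySem.List.enumerate (a :: tl) (s : Int))
          = List.foldl F (seats1, d1) (PySem.List.enumerate tl ((s + 1 : Nat) : Int)) := by
        rw [PySem.List.enumerate_cons, List.foldl_cons, hcast]
      refine ⟨?_, ?_, ?_⟩
      · rw [hfold, ih1, hseats1, PySem.List.enumerate_cons, List.filter_cons, hcast]
        by_cases hh : hitB prev s a
        · simp only [Int.toNat_natCast, hh]
          simp
        · simp only [Int.toNat_natCast, hh]
          simp
      · intro j hj
        rw [hfold, ih2 j (by omega), hd1ne j (by omega)]
      · intro j hj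
        rcases Nat.eq_or_lt_of_le hj with rfl | hlt
        · rw [hfold, ih2 s (by omega), hd1s]
          simp
        · rw [hfold, ih3 j (by omega)]
          have h1 : j - s = (j - (s + 1)) + 1 := by omega
          by_cases h2 : j - (s + 1) < tl.length
          · rw [if_pos h2, if_pos (by simp; omega), h1, List.getD_cons_succ]
          · rw [if_neg h2, if_neg (by simp; omega)]

lemma innerStep (prev : List (List Int)) (row : List Int)
    (st : List (Int × Int) × PySem.Dict Int Int) (n : Nat)
    (hd : ∀ j : Nat, st.2.get? (j : Int) = colMax prev j) :
    ∃ d' : PySem.Dict Int Int,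
      (PySem.List.enumerate (((n : Int), row) : Int × List Int).2).foldl
        (fun (st : List (Int × Int) × PySem.Dict Int Int) pj =>
          ((match st.2.get? pj.1 with
            | some m => if pj.2 ≤ m then st.1 ++ [((((n : Int), row) : Int × List Int).1, pj.1)] else st.1
            | none => st.1),
           (match st.2.get? pj.1 with
            | some m => if m < pj.2 then st.2.insert pj.1 pj.2 else st.2
            | none => st.2.insert pj.1 pj.2))) st
        = (st.1 ++ bodySpec prev (n : Int) row, d')
      ∧ ∀ j : Nat, d'.get? (j : Int) = colMax (prev ++ [row]) j := by
  obtain ⟨h1, -, h3⟩ := innerB (n : Int) prev row 0 st.1 st.2 (fun j _ => hd j)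
  simp only [Nat.sub_zero] at h3
  refine ⟨_, Prod.ext (by exact h1) rfl, ?_⟩
  intro j
  rw [colMax_append]
  exact h3 j (Nat.zero_le j)

lemma outerB :
    ∀ (rows prev : List (List Int)) (st : List (Int × Int) × PySem.Dict Int Int),
    (∀ j : Nat, st.2.get? (j : Int) = colMax prev j) →
    ((PySem.List.enumerate rows (prev.length : Int)).foldl
        (fun (st : List (Int × Int) × PySem.Dict Int Int) pi =>
          (PySem.List.enumerate pi.2).foldl (fun st pj =>
            ((match st.2.get? pj.1 with
              | some m => if pj.2 ≤ m then st.1 ++ [(pi.1, pj.1)] else st.1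
              | none => st.1),
             (match st.2.get? pj.1 with
              | some m => if m < pj.2 then st.2.insert pj.1 pj.2 else st.2
              | none => st.2.insert pj.1 pj.2))) st) st).1
      = st.1 ++ specGo prev rows := by
  intro rows
  induction rows with
  | nil => intro prev st hd; simp [PySem.List.enumerate, specGo]
  | cons row rest ih =>
      intro prev st hd
      rw [PySem.List.enumerate_cons, List.foldl_cons]
      obtain ⟨d', heq, hd'⟩ := innerStep prev row st prev.length hd
      rw [heq]
      have hc2 : ((prev.length : Int) + 1) = (((prev ++ [row]).length : Nat) : Int) := by
        simp
      rw [hc2, ih (prev ++ [row]) ((st.1 ++ bodySpec prev (prev.length : Int) row), d') hd']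
      simp [specGo, List.append_assoc]

lemma B_eq_spec (mat : List (List Int)) : pers_obs_alt mat = specGo [] mat := by
  unfold pers_obs_alt
  rw [show PySem.List.enumerate mat = PySem.List.enumerate mat ((([] : List (List Int)).length : Nat) : Int) from rfl]
  rw [outerB mat [] (([] : List (Int × Int)), (PySem.Dict.empty : PySem.Dict Int Int))
    (fun j => by simp [PySem.Dict.get?_empty, colMax])]
  simp

lemma A_go (mat : List (List Int)) (hP : Pre_pers_obs mat) :
    ∀ (n s : Nat), mat.length - s = n →
    (List.range' s n).flatMap (fun i =>
      ((List.range (mat.getD i []).length).filter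
        (fun j => persObsVerif mat j ((mat.getD i []).getD j 0) (List.range i))).map
        (fun j : Nat => ((i : Int), (j : Int))))
      = specGo (mat.take s) (mat.drop s) := by
  intro n
  induction n with
  | zero =>
      intro s hs
      rw [List.drop_eq_nil_of_le (by omega)]
      simp [specGo]
  | succ n ihn =>
      intro s hs
      have hslt : s < mat.length := by omega
      rw [List.range'_succ, List.drop_eq_getElem_cons hslt, List.flatMap_cons]
      have hrow : mat.getD s [] = mat[s] := by
        rw [List.getD_eq_getElem?_getD, List.getElem?_eq_getElem hslt]; rfl
      have hhead : ((List.range (mat.getD s []).length).filter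
            (fun j => persObsVerif mat j ((mat.getD s []).getD j 0) (List.range s))).map
            (fun j : Nat => ((s : Int), (j : Int)))
          = bodySpec (mat.take s) (((mat.take s).length : Nat) : Int) mat[s] := by
        rw [bodySpec_eq_range, List.length_take, Nat.min_eq_left (le_of_lt hslt), ← hrow]
        congr 1
        apply List.filter_congr
        intro j hj
        rw [List.mem_range] at hj
        exact verif_eq_hitB mat hP s j hslt hj
      rw [hhead]
      have htake : mat.take s ++ [mat[s]] = mat.take (s + 1) := by
        rw [List.take_add_one, List.getElem?_eq_getElem hslt]
        rfl
      have htail := ihn (s + 1) (by omega)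
      rw [← htake] at htail
      rw [htail]
      rfl

-- ===== VERDICT (by name: the statement is the Claim_ definition above) =====
theorem pers_obs_spec : Claim_equal_pers_obs := by
  intro mat _ hPre
  unfold Spec_pers_obs
  rw [A_flatMap, B_eq_spec, List.range_eq_range']
  simpa using A_go mat hPre mat.length 0 rfl
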